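-- pv_equiv track=rewrite | github.com/TheeErnie/sts_config_3sat_pred | sols_by_confs/utils/sts_properties_from_3sat.py | count_pasch_configurations
-- ===== SOURCE A (Python) =====
-- from itertools import combinations, permutations
--
-- def count_pasch_configurations(clauses):
--     """
--     Count Pasch configurations in an STS given as a list (or iterable)
--     of 3-element sets. Returns an integer count.
--     Time complexity: O(v^3) where v = number of points.
--     """
--     # normalize blocks to frozensets for hashing/lookup
--     blocks = [frozenset(b) for b in clauses]
--     if any(len(b) != 3 for b in blocks):
--         raise ValueError("All blocks must be 3-element sets")
--
--     blocks_set = set(blocks)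
--     elements = set().union(*blocks) if blocks else set()
--
--     # build map: unordered pair -> the unique block containing that pair (if any)
--     pair_to_block = {}
--     for blk in blocks:
--         for p in combinations(blk, 2):
--             key = tuple(sorted(p))
--             pair_to_block[key] = blk
--
--     seen = set()   # to avoid double-counting same Pasch
--     count = 0
--
--     # iterate over actual blocks (≈ O(v^2)), then over ordered choices inside the block (constant),
--     # then over d in remaining points (O(v)) => overall O(v^3)
--     for triple in blocks_set:
--         # choose which element of the triple acts as 'a' and order the remaining as (b,c)
--         for a in triple:
--             others = [x for x in triple if x != a]
--             for b, c in permutations(others, 2):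
--                 for d in elements - triple:
--                     # block containing pair (a,d) --> gives e
--                     key_ad = tuple(sorted((a, d)))
--                     blk_ad = pair_to_block.get(key_ad)
--                     if not blk_ad:
--                         continue
--                     e_candidates = set(blk_ad) - {a, d}
--                     if len(e_candidates) != 1:
--                         continue
--                     e = next(iter(e_candidates))
--
--                     # block containing pair (b,d) --> gives f
--                     key_bd = tuple(sorted((b, d)))
--                     blk_bd = pair_to_block.get(key_bd)
--                     if not blk_bd:
--                         continue
--                     f_candidates = set(blk_bd) - {b, d}
--                     if len(f_candidates) != 1:
--                         continue
--                     f = next(iter(f_candidates))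
--
--                     # check final required block {f, c, e}
--                     if frozenset([f, c, e]) not in blocks_set:
--                         continue
--
--                     pasch_blocks = frozenset([
--                         triple,
--                         frozenset([a, d, e]),
--                         frozenset([f, b, d]),
--                         frozenset([f, c, e]),
--                     ])
--
--                     if pasch_blocks not in seen:
--                         seen.add(pasch_blocks)
--                         count += 1
--
--     return count
-- ===== SOURCE B (Python) =====
-- from itertools import combinations, permutations
--
-- def count_pasch_configurations(clauses):
--     """
--     Count Pasch configurations via a prebuilt adjacency index: for each point a,
--     through[a] lists the (neighbor d, third point e) pairs readable straight off
--     pair_to_block, replacing A's per-(a,b,c) scan over all points with lookups.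
--     """
--     blocks = [frozenset(b) for b in clauses]
--     if any(len(b) != 3 for b in blocks):
--         raise ValueError("All blocks must be 3-element sets")
--
--     blocks_set = set(blocks)
--
--     pair_to_block = {}
--     for blk in blocks:
--         for p in combinations(blk, 2):
--             pair_to_block[tuple(sorted(p))] = blk
--
--     # adjacency index: point -> [(neighbor, unique third point of the pair's block)]
--     through = {}
--     for (x, y), blk in pair_to_block.items():
--         rest = set(blk) - {x, y}
--         if len(rest) != 1:
--             continue
--         e = next(iter(rest))
--         through.setdefault(x, []).append((y, e))
--         through.setdefault(y, []).append((x, e))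
--
--     seen = set()
--     for triple in blocks_set:
--         for a in triple:
--             others = [x for x in triple if x != a]
--             for b, c in permutations(others, 2):
--                 for d, e in through.get(a, ()):
--                     if d in triple:
--                         continue
--                     blk_bd = pair_to_block.get(tuple(sorted((b, d))))
--                     if not blk_bd:
--                         continue
--                     f_candidates = set(blk_bd) - {b, d}
--                     if len(f_candidates) != 1:
--                         continue
--                     f = next(iter(f_candidates))
--                     if frozenset([f, c, e]) not in blocks_set:
--                         continue
--                     seen.add(frozenset([triple,
--                                         frozenset([a, d, e]),
--                                         frozenset([f, b, d]),
--                                         frozenset([f, c, e])]))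
--     return len(seen)
-- ===== Notes on version B (the rewrite author's own statement) =====
-- stated objective: alternative
-- what changed: B precomputes an adjacency index `through` mapping each point a to its (neighbor d, third point e) pairs read straight off pair_to_block, and the inner loop walks through[a] instead of scanning every point d in elements-triple and doing the (a,d) lookup/unique-third extraction per (a,b,c); A's count variable is also dropped in favour of len(seen).
import Mathlib
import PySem

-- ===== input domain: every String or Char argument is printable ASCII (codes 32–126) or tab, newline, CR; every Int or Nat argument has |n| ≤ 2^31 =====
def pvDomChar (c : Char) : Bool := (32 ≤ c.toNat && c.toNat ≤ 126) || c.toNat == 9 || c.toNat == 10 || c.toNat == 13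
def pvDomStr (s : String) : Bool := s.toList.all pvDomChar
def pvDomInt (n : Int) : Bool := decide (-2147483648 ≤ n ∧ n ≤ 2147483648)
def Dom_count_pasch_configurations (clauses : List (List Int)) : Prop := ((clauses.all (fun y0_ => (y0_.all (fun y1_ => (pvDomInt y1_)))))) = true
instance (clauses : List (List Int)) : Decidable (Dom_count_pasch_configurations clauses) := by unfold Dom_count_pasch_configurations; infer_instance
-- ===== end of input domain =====

-- B replaces A's per-(a,b,c) scan over all points d with a prebuilt adjacency index
-- `through` read straight off pair_to_block (alternative decomposition; equality of the
-- RETURN value is what is proved).  Frozensets are represented by canonically sorted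
-- duplicate-free lists (set iteration order never influences the returned count, which
-- is the number of DISTINCT Pasch block-quadruples found).

-- ===== PORT A =====
-- shared helpers: this code is textually identical in both Python sources
def pvSp (x y : Int) : Int × Int := if x ≤ y then (x, y) else (y, x)

def pvInsSortBy {α : Type} (le : α → α → Bool) (x : α) : List α → List α
  | [] => [x]
  | y :: ys => if le x y then x :: y :: ys else y :: pvInsSortBy le x ys

def pvSortBy {α : Type} (le : α → α → Bool) (l : List α) : List α := l.foldr (pvInsSortBy le) []

-- canonical representation of frozenset(b): sorted list of the distinct elements
def pvCanon3 (l : List Int) : List Int := pvSortBy (fun x y => x ≤ y) l.dedup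

def pvLexLe : List Int → List Int → Bool
  | [], _ => true
  | _ :: _, [] => false
  | x :: xs, y :: ys => if x < y then true else if y < x then false else pvLexLe xs ys

-- canonical representation of a frozenset of blocks
def pvCanon4 (ls : List (List Int)) : List (List Int) := pvSortBy pvLexLe ls.dedup

def pvCombos2 : List Int → List (Int × Int)
  | [] => []
  | x :: xs => xs.map (fun y => (x, y)) ++ pvCombos2 xs

-- permutations(others, 2); exact because `others` is always duplicate-free here
def pvPerms2 (l : List Int) : List (Int × Int) :=
  l.flatMap (fun b => (l.filter (fun y => y != b)).map (fun c => (b, c)))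

def pvPtb (blocks : List (List Int)) : PySem.Dict (Int × Int) (List Int) :=
  blocks.foldl (fun d blk => (pvCombos2 blk).foldl (fun d p => d.insert (pvSp p.1 p.2) blk) d)
    PySem.Dict.empty

-- set(blk) - {x, y}, returned iff it has exactly one element (blk is duplicate-free)
def pvUniqRest (blk : List Int) (x y : Int) : Option Int :=
  match blk.filter (fun t => (t != x) && (t != y)) with
  | [e] => some e
  | _ => none

-- the (b,d)-lookup / final-block part of the loop body, identical in A and B
def pvConfigTail (ptb : PySem.Dict (Int × Int) (List Int)) (bset : PySem.Set (List Int))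
    (T : List Int) (a b c d e : Int) : Option (List (List Int)) :=
  match ptb.get? (pvSp b d) with
  | none => none
  | some blkbd =>
    if blkbd.isEmpty then none
    else match pvUniqRest blkbd b d with
      | none => none
      | some f =>
        if bset.contains (pvCanon3 [f, c, e]) then
          some (pvCanon4 [T, pvCanon3 [a, d, e], pvCanon3 [f, b, d], pvCanon3 [f, c, e]])
        else none

-- A's whole loop body for one d: `some pasch_blocks`, or none where A says `continue`
def pvConfigA (ptb : PySem.Dict (Int × Int) (List Int)) (bset : PySem.Set (List Int))
    (T : List Int) (a b c d : Int) : Option (List (List Int)) :=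
  match ptb.get? (pvSp a d) with
  | none => none
  | some blkad =>
    if blkad.isEmpty then none
    else match pvUniqRest blkad a d with
      | none => none
      | some e => pvConfigTail ptb bset T a b c d e

-- A's per-d loop body (the seen/count update)
def pvStepA (ptb : PySem.Dict (Int × Int) (List Int)) (bset : PySem.Set (List Int))
    (T : List Int) (a b c : Int) (st : PySem.Set (List (List Int)) × Int) (d : Int) :
    PySem.Set (List (List Int)) × Int :=
  match pvConfigA ptb bset T a b c d with
  | some p => if st.1.contains p then st else (PySem.Set.add st.1 p, st.2 + 1)
  | none => st

-- B's per-(d,e) loop body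
def pvStepB (ptb : PySem.Dict (Int × Int) (List Int)) (bset : PySem.Set (List Int))
    (T : List Int) (a b c : Int) (seen : PySem.Set (List (List Int))) (de : Int × Int) :
    PySem.Set (List (List Int)) :=
  if T.contains de.1 then seen
  else
    match pvConfigTail ptb bset T a b c de.1 de.2 with
    | some p => PySem.Set.add seen p
    | none => seen

def pvElems (blocks : List (List Int)) : PySem.Set Int :=
  blocks.foldl (fun s b => b.foldl PySem.Set.add s) PySem.Set.empty

def count_pasch_configurations (clauses : List (List Int)) : Int :=
  let blocks := clauses.map pvCanon3
  -- Python raises ValueError when some block has ≠ 3 distinct points; Pre_ excludes those inputs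
  if blocks.any (fun b => b.length ≠ 3) then 0
  else
    let bset : PySem.Set (List Int) := PySem.Set.ofList blocks
    let elems := pvElems blocks
    let ptb := pvPtb blocks
    (bset.foldl (fun st T =>
        T.foldl (fun st a =>
          (pvPerms2 (T.filter (fun x => x != a))).foldl (fun st bc =>
            (PySem.Set.diff elems T).foldl (pvStepA ptb bset T a bc.1 bc.2) st) st) st)
      (([] : PySem.Set (List (List Int))), (0 : Int))).2

-- ===== PORT B =====
def pvThrough (ptb : PySem.Dict (Int × Int) (List Int)) : PySem.Dict Int (List (Int × Int)) :=
  ptb.items.foldl (fun th it =>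
      match pvUniqRest it.2 it.1.1 it.1.2 with
      | none => th
      | some e =>
        let th1 := th.insert it.1.1 (th.getD it.1.1 [] ++ [(it.1.2, e)])
        th1.insert it.1.2 (th1.getD it.1.2 [] ++ [(it.1.1, e)]))
    PySem.Dict.empty

def count_pasch_configurations_alt (clauses : List (List Int)) : Int :=
  let blocks := clauses.map pvCanon3
  -- same ValueError guard as A; Pre_ excludes these inputs
  if blocks.any (fun b => b.length ≠ 3) then 0
  else
    let bset : PySem.Set (List Int) := PySem.Set.ofList blocks
    let ptb := pvPtb blocks
    let through := pvThrough ptb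
    ((bset.foldl (fun seen T =>
        T.foldl (fun seen a =>
          (pvPerms2 (T.filter (fun x => x != a))).foldl (fun seen bc =>
            (through.getD a []).foldl (pvStepB ptb bset T a bc.1 bc.2) seen) seen) seen)
      ([] : PySem.Set (List (List Int)))).length : Int)

-- ===== PRECONDITION & SPEC =====
-- Pre_ excludes exactly the inputs where A raises ValueError (a clause with ≠ 3 distinct values)
def Pre_count_pasch_configurations (clauses : List (List Int)) : Prop :=
  ∀ c ∈ clauses, c.dedup.length = 3
instance (clauses : List (List Int)) : Decidable (Pre_count_pasch_configurations clauses) := by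
  unfold Pre_count_pasch_configurations; infer_instance

def pvWitness_count_pasch_configurations : List (List Int) := [[1, 2, 3], [1, 4, 5], [2, 4, 6]]

def Spec_count_pasch_configurations (clauses : List (List Int)) (out : Int) : Prop :=
  out = count_pasch_configurations_alt clauses
instance (clauses : List (List Int)) (out : Int) :
    Decidable (Spec_count_pasch_configurations clauses out) := by
  unfold Spec_count_pasch_configurations; infer_instance

-- ===== CLAIM (what is proved, stated in full; the proofs are below) =====
def Claim_equal_count_pasch_configurations : Prop :=
  ∀ (clauses : List (List Int)), Dom_count_pasch_configurations clauses →
    Pre_count_pasch_configurations clauses →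
    Spec_count_pasch_configurations clauses (count_pasch_configurations clauses)

-- ===== LEMMAS AND PROOFS =====

-- the (multi-)lists of configurations the two loops run through, in loop order
def pvCfgsA (ptb : PySem.Dict (Int × Int) (List Int)) (bset : PySem.Set (List Int))
    (elems : PySem.Set Int) : List (List (List Int)) :=
  bset.flatMap (fun T => T.flatMap (fun a =>
    (pvPerms2 (T.filter (fun x => x != a))).flatMap (fun bc =>
      (PySem.Set.diff elems T).filterMap (fun d => pvConfigA ptb bset T a bc.1 bc.2 d))))

def pvCfgsB (ptb : PySem.Dict (Int × Int) (List Int)) (bset : PySem.Set (List Int))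
    (through : PySem.Dict Int (List (Int × Int))) : List (List (List Int)) :=
  bset.flatMap (fun T => T.flatMap (fun a =>
    (pvPerms2 (T.filter (fun x => x != a))).flatMap (fun bc =>
      (through.getD a []).filterMap (fun de =>
        if T.contains de.1 then none else pvConfigTail ptb bset T a bc.1 bc.2 de.1 de.2))))

lemma foldA_collapse (ptb : PySem.Dict (Int × Int) (List Int)) (bset : PySem.Set (List Int))
    (elems : PySem.Set Int) (st0 : PySem.Set (List (List Int)) × Int) :
    bset.foldl (fun st T =>
        T.foldl (fun st a =>
          (pvPerms2 (T.filter (fun x => x != a))).foldl (fun st bc =>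
            (PySem.Set.diff elems T).foldl (pvStepA ptb bset T a bc.1 bc.2) st) st) st) st0
      = List.foldl (fun st p => if st.1.contains p then st else (PySem.Set.add st.1 p, st.2 + 1))
          st0 (pvCfgsA ptb bset elems) := by
  simp only [pvCfgsA, List.foldl_flatMap, List.foldl_filterMap]
  congr 1
  funext st T
  congr 1
  funext st a
  congr 1
  funext st bc
  congr 1
  funext st d
  cases h : pvConfigA ptb bset T a bc.1 bc.2 d <;> simp [pvStepA, h]

lemma foldB_collapse (ptb : PySem.Dict (Int × Int) (List Int)) (bset : PySem.Set (List Int))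
    (through : PySem.Dict Int (List (Int × Int))) (s0 : PySem.Set (List (List Int))) :
    bset.foldl (fun seen T =>
        T.foldl (fun seen a =>
          (pvPerms2 (T.filter (fun x => x != a))).foldl (fun seen bc =>
            (through.getD a []).foldl (pvStepB ptb bset T a bc.1 bc.2) seen) seen) seen) s0
      = List.foldl PySem.Set.add s0 (pvCfgsB ptb bset through) := by
  simp only [pvCfgsB, List.foldl_flatMap, List.foldl_filterMap]
  congr 1
  funext seen T
  congr 1
  funext seen a
  congr 1
  funext seen bc
  congr 1
  funext seen de
  by_cases h : de.1 ∈ T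
  · simp [pvStepB, h]
  · simp [pvStepB, h]
    cases pvConfigTail ptb bset T a bc.1 bc.2 de.1 de.2 <;> rfl

lemma foldl_insA (l : List (List (List Int))) (s : PySem.Set (List (List Int))) :
    List.foldl (fun (st : PySem.Set (List (List Int)) × Int) p =>
        if st.1.contains p then st else (PySem.Set.add st.1 p, st.2 + 1)) (s, (s.length : Int)) l
      = (List.foldl PySem.Set.add s l, ((List.foldl PySem.Set.add s l).length : Int)) := by
  induction l generalizing s with
  | nil => rfl
  | cons p l ih =>
    by_cases h : p ∈ s
    · have hc : PySem.Set.contains s p = true := (PySem.Set.contains_iff s p).mpr h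
      simp only [List.foldl_cons, hc, if_true, PySem.Set.add_of_mem h]
      exact ih s
    · have hc : PySem.Set.contains s p = false := by
        cases hcc : PySem.Set.contains s p
        · rfl
        · exact absurd ((PySem.Set.contains_iff s p).mp hcc) h
      simp only [List.foldl_cons, hc, Bool.false_eq_true, if_false, PySem.Set.add_of_not_mem h]
      have hthis := ih (s ++ [p])
      have hl : (((s ++ [p]).length : Int)) = (s.length : Int) + 1 := by
        simp [List.length_append]
      rw [hl] at hthis
      exact hthis

lemma len_fold_add_eq (l1 l2 : List (List (List Int))) (h : ∀ x, x ∈ l1 ↔ x ∈ l2) :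
    (List.foldl PySem.Set.add ([] : PySem.Set (List (List Int))) l1).length
      = (List.foldl PySem.Set.add ([] : PySem.Set (List (List Int))) l2).length := by
  rw [← PySem.Set.ofList_eq_foldl, ← PySem.Set.ofList_eq_foldl]
  refine List.Perm.length_eq ?_
  refine (List.perm_ext_iff_of_nodup (PySem.Set.nodup_ofList _) (PySem.Set.nodup_ofList _)).mpr ?_
  intro x
  simp [PySem.Set.mem_ofList, h x]

-- sorting facts, for Nodup of canonical blocks
lemma pvInsSortBy_perm {α : Type} (le : α → α → Bool) (x : α) (l : List α) :
    (pvInsSortBy le x l).Perm (x :: l) := by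
  induction l with
  | nil => simp [pvInsSortBy]
  | cons y ys ih =>
    by_cases h : le x y
    · simp [pvInsSortBy, h]
    · simp only [pvInsSortBy, h, Bool.false_eq_true, if_false]
      exact (List.Perm.cons y ih).trans (List.Perm.swap x y ys)

lemma pvSortBy_perm {α : Type} (le : α → α → Bool) (l : List α) : (pvSortBy le l).Perm l := by
  induction l with
  | nil => rfl
  | cons x xs ih =>
    simp only [pvSortBy, List.foldr_cons]
    exact (pvInsSortBy_perm le x _).trans (List.Perm.cons x ih)

lemma pvCanon3_nodup (l : List Int) : (pvCanon3 l).Nodup :=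
  ((pvSortBy_perm _ l.dedup).nodup_iff).mpr l.nodup_dedup

-- membership of elems
lemma mem_pvElems_fold (blocks : List (List Int)) (s : PySem.Set Int) (x : Int) :
    x ∈ blocks.foldl (fun s b => b.foldl PySem.Set.add s) s ↔ x ∈ s ∨ ∃ b ∈ blocks, x ∈ b := by
  induction blocks generalizing s with
  | nil => simp
  | cons b bs ih =>
    simp only [List.foldl_cons]
    rw [ih]
    have : (List.foldl PySem.Set.add s b) = PySem.Set.update s b := rfl
    rw [this, PySem.Set.mem_update]
    constructor
    · rintro ((h | h) | ⟨b', hb', hx⟩)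
      · exact Or.inl h
      · exact Or.inr ⟨b, List.mem_cons_self, h⟩
      · exact Or.inr ⟨b', List.mem_cons_of_mem _ hb', hx⟩
    · rintro (h | ⟨b', hb', hx⟩)
      · exact Or.inl (Or.inl h)
      · rcases List.mem_cons.mp hb' with rfl | hb'
        · exact Or.inl (Or.inr hx)
        · exact Or.inr ⟨b', hb', hx⟩

lemma mem_pvElems (blocks : List (List Int)) (x : Int) :
    x ∈ pvElems blocks ↔ ∃ b ∈ blocks, x ∈ b := by
  rw [pvElems, mem_pvElems_fold]
  simp [PySem.Set.empty]

-- combos2 facts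
lemma mem_pvCombos2 (b : List Int) (p : Int × Int) (hp : p ∈ pvCombos2 b) :
    p.1 ∈ b ∧ p.2 ∈ b := by
  induction b with
  | nil => simp [pvCombos2] at hp
  | cons x xs ih =>
    simp only [pvCombos2, List.mem_append, List.mem_map] at hp
    rcases hp with ⟨y, hy, rfl⟩ | hp
    · exact ⟨List.mem_cons_self, List.mem_cons_of_mem _ hy⟩
    · rcases ih hp with ⟨h1, h2⟩
      exact ⟨List.mem_cons_of_mem _ h1, List.mem_cons_of_mem _ h2⟩

lemma pvCombos2_ne (b : List Int) (hb : b.Nodup) (p : Int × Int) (hp : p ∈ pvCombos2 b) :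
    p.1 ≠ p.2 := by
  induction b with
  | nil => simp [pvCombos2] at hp
  | cons x xs ih =>
    simp only [pvCombos2, List.mem_append, List.mem_map] at hp
    rcases List.nodup_cons.mp hb with ⟨hx, hxs⟩
    rcases hp with ⟨y, hy, rfl⟩ | hp
    · intro h
      simp only at h
      exact hx (by rw [h]; exact hy)
    · exact ih hxs hp

-- ptb facts
lemma pvPtb_items_sub_block (blk : List Int) :
    ∀ (L : List (Int × Int)) (d : PySem.Dict (Int × Int) (List Int)) (p : (Int × Int) × List Int),
      p ∈ (L.foldl (fun d q => d.insert (pvSp q.1 q.2) blk) d).items →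
      p ∈ d.items ∨ (p.2 = blk ∧ ∃ q ∈ L, p.1 = pvSp q.1 q.2) := by
  intro L
  induction L with
  | nil => intro d p hp; exact Or.inl hp
  | cons q L ih =>
    intro d p hp
    rcases ih _ p hp with h | ⟨h2, q', hq', h1⟩
    · rw [PySem.Dict.mem_items_insert] at h
      rcases h with rfl | ⟨h, _⟩
      · exact Or.inr ⟨rfl, q, List.mem_cons_self, rfl⟩
      · exact Or.inl h
    · exact Or.inr ⟨h2, q', List.mem_cons_of_mem _ hq', h1⟩

lemma pvPtb_items_sub (blocks : List (List Int)) :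
    ∀ (d : PySem.Dict (Int × Int) (List Int)) (p : (Int × Int) × List Int),
      p ∈ (blocks.foldl (fun d blk => (pvCombos2 blk).foldl
            (fun d q => d.insert (pvSp q.1 q.2) blk) d) d).items →
      p ∈ d.items ∨ ∃ b ∈ blocks, p.2 = b ∧ ∃ q ∈ pvCombos2 b, p.1 = pvSp q.1 q.2 := by
  induction blocks with
  | nil => intro d p hp; exact Or.inl hp
  | cons b bs ih =>
    intro d p hp
    rcases ih _ p hp with h | ⟨b', hb', h⟩
    · rcases pvPtb_items_sub_block b _ _ _ h with h | ⟨h2, q, hq, h1⟩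
      · exact Or.inl h
      · exact Or.inr ⟨b, List.mem_cons_self, h2, q, hq, h1⟩
    · exact Or.inr ⟨b', List.mem_cons_of_mem _ hb', h⟩

lemma pvSp_lt (x y : Int) (h : x ≠ y) : (pvSp x y).1 < (pvSp x y).2 := by
  unfold pvSp
  by_cases hle : x ≤ y <;> simp [hle] <;> omega

lemma pvSp_mem (x y : Int) : (pvSp x y).1 = x ∨ (pvSp x y).1 = y := by
  unfold pvSp; by_cases hle : x ≤ y <;> simp [hle]

lemma pvSp_mem2 (x y : Int) : (pvSp x y).2 = x ∨ (pvSp x y).2 = y := by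
  unfold pvSp; by_cases hle : x ≤ y <;> simp [hle]

-- shape of every ptb item: sorted key over points of the STS
lemma pvPtb_item_shape (blocks : List (List Int)) (hnd : ∀ b ∈ blocks, b.Nodup)
    (p : (Int × Int) × List Int) (hp : p ∈ (pvPtb blocks).items) :
    p.1.1 < p.1.2 ∧ p.1.1 ∈ pvElems blocks ∧ p.1.2 ∈ pvElems blocks := by
  rcases pvPtb_items_sub blocks _ p hp with h | ⟨b, hb, _, q, hq, h1⟩
  · simp [PySem.Dict.empty] at h
  · have hne := pvCombos2_ne b (hnd b hb) q hq
    have hmem := mem_pvCombos2 b q hq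
    have hlt := pvSp_lt q.1 q.2 hne
    have h1m : p.1.1 ∈ pvElems blocks := by
      rw [mem_pvElems]
      rcases pvSp_mem q.1 q.2 with h' | h'
      · exact ⟨b, hb, by rw [h1, h']; exact hmem.1⟩
      · exact ⟨b, hb, by rw [h1, h']; exact hmem.2⟩
    have h2m : p.1.2 ∈ pvElems blocks := by
      rw [mem_pvElems]
      rcases pvSp_mem2 q.1 q.2 with h' | h'
      · exact ⟨b, hb, by rw [h1, h']; exact hmem.1⟩
      · exact ⟨b, hb, by rw [h1, h']; exact hmem.2⟩
    exact ⟨by rw [h1]; exact hlt, h1m, h2m⟩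

lemma pvPtb_keys_nodup (blocks : List (List Int)) : (pvPtb blocks).keys.Nodup := by
  unfold pvPtb
  have : ∀ (bs : List (List Int)) (d : PySem.Dict (Int × Int) (List Int)),
      d.keys.Nodup →
      (bs.foldl (fun d blk => (pvCombos2 blk).foldl
        (fun d q => d.insert (pvSp q.1 q.2) blk) d) d).keys.Nodup := by
    intro bs
    induction bs with
    | nil => intro d hd; exact hd
    | cons b bs ih =>
      intro d hd
      refine ih _ ?_
      exact PySem.Dict.nodup_keys_foldl_insert_key (pvCombos2 b) (fun q => pvSp q.1 q.2)
        (fun _ _ => b) d hd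
  exact this blocks _ (by simp [PySem.Dict.empty, PySem.Dict.keys])

lemma pvUniqRest_comm (blk : List Int) (x y : Int) :
    pvUniqRest blk x y = pvUniqRest blk y x := by
  unfold pvUniqRest
  rw [List.filter_congr (fun t _ => by rw [Bool.and_comm])]

lemma pvUniqRest_not_empty (blk : List Int) (x y e : Int) (h : pvUniqRest blk x y = some e) :
    blk.isEmpty = false := by
  cases blk with
  | nil => simp [pvUniqRest] at h
  | cons a l => rfl

-- membership spec of the adjacency index built by pvThrough
lemma pvThrough_fold_mem (L : List ((Int × Int) × List Int))
    (hL : ∀ p ∈ L, p.1.1 ≠ p.1.2) :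
    ∀ (th : PySem.Dict Int (List (Int × Int))) (a d e : Int),
    ((d, e) ∈ (L.foldl (fun th it =>
        match pvUniqRest it.2 it.1.1 it.1.2 with
        | none => th
        | some e =>
          let th1 := th.insert it.1.1 (th.getD it.1.1 [] ++ [(it.1.2, e)])
          th1.insert it.1.2 (th1.getD it.1.2 [] ++ [(it.1.1, e)])) th).getD a [])
      ↔ ((d, e) ∈ th.getD a [] ∨ ∃ p ∈ L, pvUniqRest p.2 p.1.1 p.1.2 = some e ∧
          ((p.1.1 = a ∧ p.1.2 = d) ∨ (p.1.2 = a ∧ p.1.1 = d))) := by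
  induction L with
  | nil => intro th a d e; simp
  | cons it L ih =>
    intro th a d e
    have hxy : it.1.1 ≠ it.1.2 := hL it List.mem_cons_self
    have hL' : ∀ p ∈ L, p.1.1 ≠ p.1.2 := fun p hp => hL p (List.mem_cons_of_mem _ hp)
    simp only [List.foldl_cons]
    cases hu : pvUniqRest it.2 it.1.1 it.1.2 with
    | none =>
      rw [ih hL' th a d e]
      constructor
      · rintro (h | h)
        · exact Or.inl h
        · refine Or.inr ?_
          rcases h with ⟨p, hp, h1, h2⟩
          exact ⟨p, List.mem_cons_of_mem _ hp, h1, h2⟩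
      · rintro (h | ⟨p, hp, h1, h2⟩)
        · exact Or.inl h
        · rcases List.mem_cons.mp hp with rfl | hp
          · rw [hu] at h1; cases h1
          · exact Or.inr ⟨p, hp, h1, h2⟩
    | some e0 =>
      rw [ih hL']
      have hgd : ∀ a' : Int,
          ((th.insert it.1.1 (th.getD it.1.1 [] ++ [(it.1.2, e0)])).insert it.1.2
            (((th.insert it.1.1 (th.getD it.1.1 [] ++ [(it.1.2, e0)])).getD it.1.2 [])
              ++ [(it.1.1, e0)])).getD a' []
          = if a' = it.1.2 then th.getD it.1.2 [] ++ [(it.1.1, e0)]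
            else if a' = it.1.1 then th.getD it.1.1 [] ++ [(it.1.2, e0)]
            else th.getD a' [] := by
        intro a'
        rw [PySem.Dict.getD_insert, PySem.Dict.getD_insert, PySem.Dict.getD_insert]
        by_cases h2 : a' = it.1.2
        · subst h2
          simp [Ne.symm hxy]
        · simp [h2]
      rw [hgd]
      constructor
      · rintro (h | ⟨p, hp, h1, h2⟩)
        · by_cases hy2 : a = it.1.2
          · subst hy2
            rw [if_pos rfl, List.mem_append] at h
            rcases h with h | h
            · exact Or.inl h
            · simp only [List.mem_singleton, Prod.mk.injEq] at h
              exact Or.inr ⟨it, List.mem_cons_self, by rw [hu, h.2], Or.inr ⟨rfl, h.1.symm⟩⟩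
          · by_cases hy1 : a = it.1.1
            · subst hy1
              rw [if_neg hy2, if_pos rfl, List.mem_append] at h
              rcases h with h | h
              · exact Or.inl h
              · simp only [List.mem_singleton, Prod.mk.injEq] at h
                exact Or.inr ⟨it, List.mem_cons_self, by rw [hu, h.2], Or.inl ⟨rfl, h.1.symm⟩⟩
            · rw [if_neg hy2, if_neg hy1] at h
              exact Or.inl h
        · exact Or.inr ⟨p, List.mem_cons_of_mem _ hp, h1, h2⟩
      · rintro (h | ⟨p, hp, h1, h2⟩)
        · refine Or.inl ?_
          by_cases hy2 : a = it.1.2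
          · subst hy2; rw [if_pos rfl]; exact List.mem_append_left _ h
          · by_cases hy1 : a = it.1.1
            · subst hy1; rw [if_neg hy2, if_pos rfl]; exact List.mem_append_left _ h
            · rw [if_neg hy2, if_neg hy1]; exact h
        · rcases List.mem_cons.mp hp with rfl | hp
          · rw [hu] at h1
            injection h1 with h1
            subst h1
            refine Or.inl ?_
            rcases h2 with ⟨ha, hd⟩ | ⟨ha, hd⟩
            · subst ha
              rw [if_neg hxy, if_pos rfl]
              exact List.mem_append_right _ (by simp [← hd])
            · subst ha
              rw [if_pos rfl]
              exact List.mem_append_right _ (by simp [← hd])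
          · exact Or.inr ⟨p, hp, h1, h2⟩

-- the bridge: scanning d over elements - T with (a,d) lookups ≡ scanning through[a]
lemma dScan_iff (blocks : List (List Int)) (hnd : ∀ b ∈ blocks, b.Nodup)
    (bset : PySem.Set (List Int)) (T : List Int) (a b c : Int) (x : List (List Int)) :
    (∃ d, d ∈ PySem.Set.diff (pvElems blocks) T ∧
        pvConfigA (pvPtb blocks) bset T a b c d = some x)
    ↔ (∃ de, de ∈ (pvThrough (pvPtb blocks)).getD a [] ∧
        (if T.contains de.1 then none
         else pvConfigTail (pvPtb blocks) bset T a b c de.1 de.2) = some x) := by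
  have hkeys := pvPtb_keys_nodup blocks
  have hL : ∀ p ∈ (pvPtb blocks).items, p.1.1 ≠ p.1.2 := fun p hp =>
    ne_of_lt (pvPtb_item_shape blocks hnd p hp).1
  have hth := pvThrough_fold_mem (pvPtb blocks).items hL PySem.Dict.empty
  constructor
  · rintro ⟨d, hd, hcfg⟩
    rw [PySem.Set.mem_diff] at hd
    unfold pvConfigA at hcfg
    split at hcfg
    · cases hcfg
    · rename_i blkad hget
      split at hcfg
      · cases hcfg
      · split at hcfg
        · cases hcfg
        · rename_i e hu
          refine ⟨(d, e), ?_, ?_⟩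
          · rw [pvThrough, hth]
            refine Or.inr ⟨(pvSp a d, blkad),
              PySem.Dict.mem_items_of_get?_eq_some _ hget, ?_, ?_⟩
            · unfold pvSp
              by_cases hle : a ≤ d
              · simpa [hle] using hu
              · simp only [hle, if_false]
                rw [pvUniqRest_comm]
                simpa [hle] using hu
            · unfold pvSp
              by_cases hle : a ≤ d <;> simp [hle]
          · have hc : T.contains d = false := by
              cases hcc : T.contains d
              · rfl
              · exact absurd (List.contains_iff_mem.mp hcc) hd.2
            simp only [hc, Bool.false_eq_true, if_false]
            exact hcfg
  · rintro ⟨⟨d, e⟩, hde, hcfg⟩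
    by_cases hc : T.contains d
    · rw [if_pos (by simpa using hc)] at hcfg; cases hcfg
    rw [if_neg (by simpa using hc)] at hcfg
    rw [pvThrough, hth] at hde
    rcases hde with h | ⟨⟨k, blk⟩, hp, hu, hk⟩
    · simp [PySem.Dict.empty, PySem.Dict.get?, PySem.Dict.getD] at h
    · have hshape := pvPtb_item_shape blocks hnd (k, blk) hp
      have hget : (pvPtb blocks).get? k = some blk :=
        PySem.Dict.get?_of_mem_items _ hp hkeys
      have hdmem : d ∈ pvElems blocks := by
        rcases hk with ⟨_, hd⟩ | ⟨_, hd⟩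
        · exact hd ▸ hshape.2.2
        · exact hd ▸ hshape.2.1
      have hsp : pvSp a d = k := by
        rcases hk with ⟨ha, hd⟩ | ⟨ha, hd⟩
        · have : k.1 < k.2 := hshape.1
          unfold pvSp
          rw [if_pos (by omega)]
          exact Prod.ext ha.symm hd.symm
        · have : k.1 < k.2 := hshape.1
          unfold pvSp
          rw [if_neg (by omega)]
          exact Prod.ext hd.symm ha.symm
      have hu' : pvUniqRest blk a d = some e := by
        rcases hk with ⟨ha, hd⟩ | ⟨ha, hd⟩
        · rw [← ha, ← hd]; exact hu
        · rw [← ha, ← hd, pvUniqRest_comm]; exact hu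
      refine ⟨d, ?_, ?_⟩
      · rw [PySem.Set.mem_diff]
        exact ⟨hdmem, fun hmem => absurd (List.contains_iff_mem.mpr hmem) (by simpa using hc)⟩
      · simp only [pvConfigA, hsp, hget, pvUniqRest_not_empty blk a d e hu',
          Bool.false_eq_true, if_false, hu']
        exact hcfg

lemma cfgs_mem_iff (blocks : List (List Int)) (hnd : ∀ b ∈ blocks, b.Nodup)
    (bset : PySem.Set (List Int)) (x : List (List Int)) :
    x ∈ pvCfgsA (pvPtb blocks) bset (pvElems blocks)
      ↔ x ∈ pvCfgsB (pvPtb blocks) bset (pvThrough (pvPtb blocks)) := by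
  simp only [pvCfgsA, pvCfgsB, List.mem_flatMap, List.mem_filterMap]
  refine exists_congr fun T => and_congr_right fun _ => ?_
  refine exists_congr fun a => and_congr_right fun _ => ?_
  refine exists_congr fun bc => and_congr_right fun _ => ?_
  exact dScan_iff blocks hnd bset T a bc.1 bc.2 x

-- ===== VERDICT (by name: the statement is the Claim_ definition above) =====
theorem count_pasch_configurations_spec : Claim_equal_count_pasch_configurations := by
  unfold Claim_equal_count_pasch_configurations
  intro clauses _ _
  unfold Spec_count_pasch_configurations
  unfold count_pasch_configurations count_pasch_configurations_alt
  by_cases hg : (clauses.map pvCanon3).any (fun b => b.length ≠ 3)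
  · simp only [hg, if_pos]
  · simp only [hg, if_neg, Bool.not_eq_true]
    rw [foldA_collapse, foldB_collapse]
    have h0 : ((0 : Int)) = ((([] : PySem.Set (List (List Int))).length : Int)) := rfl
    rw [h0, foldl_insA]
    have hnd : ∀ b ∈ clauses.map pvCanon3, b.Nodup := by
      intro b hb
      rcases List.mem_map.mp hb with ⟨c, _, rfl⟩
      exact pvCanon3_nodup c
    exact congrArg _ (len_fold_add_eq _ _
      (cfgs_mem_iff (clauses.map pvCanon3) hnd (PySem.Set.ofList (clauses.map pvCanon3))))
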